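-- pv_equiv track=rewrite | github.com/julian73KMG/Parcial | parcial2.py | hayVocales
-- ===== SOURCE A (Python) =====
-- def hayVocales(v):
--     s = 0   #Variable de suma
--     for i in v: #Recorre la lista
--         s = (i.count('a')  +  i.count('A') +    #contara las vocales en la palabra y sumara, asignando el valor a s
--             i.count('e')  +  i.count('E') +
--             i.count('i')  +  i.count('I') +
--             i.count('o')  +  i.count('O') +
--             i.count('u')  +  i.count('U'))
--         if s >= 2: #Si s es mayor o igual a 2 devuelve la palabra, sino, vuelve al for
--             return i
--     return 'No hay dos o más vocales'   #Si no hay 2 o más vocales devuelve el mensaje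
-- ===== SOURCE B (Python) =====
-- def _hasTwoVowels(w):
--     c = 0
--     for ch in w:
--         if ch in "aeiouAEIOU":
--             c += 1
--             if c == 2:
--                 return True
--     return False
--
--
-- def hayVocales(v):
--     for w in v:
--         if _hasTwoVowels(w):
--             return w
--     return 'No hay dos o más vocales'
-- ===== Notes on version B (the rewrite author's own statement) =====
-- stated objective: faster
-- what changed: Replaces the ten separate str.count scans per word with a single character pass keeping a vowel counter that early-exits as soon as the second vowel is seen.
import Mathlib
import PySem

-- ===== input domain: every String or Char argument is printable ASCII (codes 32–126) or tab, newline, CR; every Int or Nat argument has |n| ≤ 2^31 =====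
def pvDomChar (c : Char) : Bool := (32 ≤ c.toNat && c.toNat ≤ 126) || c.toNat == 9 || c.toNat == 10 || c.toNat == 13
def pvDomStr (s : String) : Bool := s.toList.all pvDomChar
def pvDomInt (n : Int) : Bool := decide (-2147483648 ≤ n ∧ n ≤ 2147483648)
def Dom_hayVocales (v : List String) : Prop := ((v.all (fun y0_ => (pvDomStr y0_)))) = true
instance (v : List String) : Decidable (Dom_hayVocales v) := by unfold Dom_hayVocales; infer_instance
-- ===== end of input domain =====

-- B replaces A's ten per-word str.count scans by one character pass with a counter and early exit; objective: simpler.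

-- ===== PORT A =====
-- transliteration of A: for each word sum the ten vowel counts, return it when the sum ≥ 2
def hayVocales (v : List String) : String :=
  match v with
  | [] => "No hay dos o más vocales"
  | i :: rest =>
    let s : Nat :=
      PySem.Str.count i "a" + PySem.Str.count i "A" +
      PySem.Str.count i "e" + PySem.Str.count i "E" +
      PySem.Str.count i "i" + PySem.Str.count i "I" +
      PySem.Str.count i "o" + PySem.Str.count i "O" +
      PySem.Str.count i "u" + PySem.Str.count i "U"
    if s ≥ 2 then i else hayVocales rest

-- ===== PORT B =====
-- transliteration of Source B's _hasTwoVowels: one pass over the characters, counter, early True at 2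
def isVowel (c : Char) : Bool := "aeiouAEIOU".toList.contains c  -- ch in "aeiouAEIOU" (single char)

def twoVowGo (cs : List Char) (c : Int) : Bool :=
  match cs with
  | [] => false
  | ch :: rest =>
    if isVowel ch then
      let c' := c + 1
      if c' == 2 then true else twoVowGo rest c'
    else twoVowGo rest c

def hasTwoVowels (w : String) : Bool := twoVowGo w.toList 0

def hayVocales_alt (v : List String) : String :=
  match v with
  | [] => "No hay dos o más vocales"
  | w :: rest => if hasTwoVowels w then w else hayVocales_alt rest

-- ===== PRECONDITION & SPEC =====
def Spec_hayVocales (v : List String) (out : String) : Prop := out = hayVocales_alt v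
instance (v : List String) (out : String) : Decidable (Spec_hayVocales v out) := by unfold Spec_hayVocales; infer_instance

-- ===== CLAIM (what is proved, stated in full; the proofs are below) =====
def Claim_equal_hayVocales : Prop := ∀ (v : List String), Dom_hayVocales v → Spec_hayVocales v (hayVocales v)

-- ===== LEMMAS AND PROOFS =====

-- PySem.Chars.count with a single-character needle is plain List.count
theorem go_single (c : Char) : ∀ (l : List Char) (fuel acc : Nat), l.length ≤ fuel →
    PySem.Chars.count.go [c] fuel l acc = acc + l.count c := by
  intro l
  induction l with
  | nil => intro fuel acc h; cases fuel <;> simp [PySem.Chars.count.go]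
  | cons h t ih =>
    intro fuel acc hle
    cases fuel with
    | zero => simp at hle
    | succ n =>
      simp only [PySem.Chars.count.go]
      by_cases hc : c = h
      · subst hc
        rw [if_pos (by simp [List.isPrefixOf])]
        have hd : List.drop ([c] : List Char).length (c :: t) = t := by simp
        rw [hd, ih n (acc+1) (by simpa using hle)]
        rw [List.count_cons_self]; omega
      · rw [if_neg (by simp [List.isPrefixOf, hc]), ih n acc (by simpa using hle)]
        simp [Ne.symm hc]

theorem count_single (cs : List Char) (c : Char) : PySem.Chars.count cs [c] = cs.count c := by
  simp [PySem.Chars.count, go_single c cs cs.length 0 le_rfl]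

-- the ten single-char counts add up to the count of vowels
theorem sum_counts_eq_countP (l : List Char) :
    l.count 'a' + l.count 'A' + l.count 'e' + l.count 'E' +
    l.count 'i' + l.count 'I' + l.count 'o' + l.count 'O' +
    l.count 'u' + l.count 'U' = l.countP isVowel := by
  induction l with
  | nil => decide
  | cons h t ih =>
    simp only [List.count_cons, List.countP_cons]
    by_cases hv : h ∈ (['a','e','i','o','u','A','E','I','O','U'] : List Char)
    · fin_cases hv <;> simp [isVowel, ← ih] <;> omega
    · simp only [List.mem_cons, List.not_mem_nil, or_false] at hv
      push Not at hv
      obtain ⟨h1,h2,h3,h4,h5,h6,h7,h8,h9,h10⟩ := hv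
      have hvf : isVowel h = false := by
        simp [isVowel, h1,h2,h3,h4,h5,h6,h7,h8,h9,h10]
      simp [hvf, h1, h2, h3, h4, h5, h6, h7, h8, h9, h10, ih]

-- B's early-exit counter scan is true iff the vowel count reaches 2
theorem twoVowGo_iff : ∀ (l : List Char) (c : Int), 0 ≤ c → c < 2 →
    (twoVowGo l c = true ↔ 2 ≤ c + (l.countP isVowel : Int)) := by
  intro l
  induction l with
  | nil => intro c h0 h2; simp [twoVowGo]; omega
  | cons h t ih =>
    intro c h0 h2
    simp only [twoVowGo, List.countP_cons]
    by_cases hv : isVowel h = true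
    · rw [if_pos hv]
      by_cases he : c + 1 = 2
      · rw [if_pos (by simp [he])]
        simp [hv]
        omega
      · rw [if_neg (by simp [he]), ih (c+1) (by omega) (by omega)]
        simp [hv]
        omega
    · rw [if_neg (by simpa using hv), ih c h0 h2]
      simp [hv]

theorem hasTwoVowels_iff (w : String) :
    hasTwoVowels w = true ↔ 2 ≤ w.toList.countP isVowel := by
  rw [hasTwoVowels, twoVowGo_iff w.toList 0 (by omega) (by omega)]
  omega

theorem hayVocales_eq_alt : ∀ (v : List String), hayVocales v = hayVocales_alt v := by
  intro v
  induction v with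
  | nil => rfl
  | cons i rest ih =>
    simp only [hayVocales, hayVocales_alt]
    have hs : PySem.Str.count i "a" + PySem.Str.count i "A" +
        PySem.Str.count i "e" + PySem.Str.count i "E" +
        PySem.Str.count i "i" + PySem.Str.count i "I" +
        PySem.Str.count i "o" + PySem.Str.count i "O" +
        PySem.Str.count i "u" + PySem.Str.count i "U" = i.toList.countP isVowel := by
      simp only [PySem.Str.count_eq]
      simp only [show ("a" : String).toList = ['a'] from rfl, show ("A" : String).toList = ['A'] from rfl,
        show ("e" : String).toList = ['e'] from rfl, show ("E" : String).toList = ['E'] from rfl,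
        show ("i" : String).toList = ['i'] from rfl, show ("I" : String).toList = ['I'] from rfl,
        show ("o" : String).toList = ['o'] from rfl, show ("O" : String).toList = ['O'] from rfl,
        show ("u" : String).toList = ['u'] from rfl, show ("U" : String).toList = ['U'] from rfl,
        count_single]
      exact sum_counts_eq_countP i.toList
    by_cases h2 : 2 ≤ i.toList.countP isVowel
    · rw [if_pos (by rw [hs]; omega), if_pos ((hasTwoVowels_iff i).mpr h2)]
    · rw [if_neg (by rw [hs]; omega), if_neg (by simp [hasTwoVowels_iff, h2]), ih]

-- ===== VERDICT (by name: the statement is the Claim_ definition above) =====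
theorem hayVocales_spec : Claim_equal_hayVocales :=
  fun v _ => hayVocales_eq_alt v
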